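-- pv_equiv track=rewrite | github.com/avinashreddy2122/CP | 07-set_kth_digit-Python/set_kth_digit.py | fun_set_kth_digit
-- ===== SOURCE A (Python) =====
-- def fun_set_kth_digit(n, k, d):
--
-- 	flag=False
-- 	if n<0:
-- 		n=-n
-- 		flag=True
-- 	cnt=0
-- 	res=0
-- 	while(n>0):
-- 		r=n%10
-- 		if cnt==k:
-- 			res += (d*(10**cnt))
-- 		else:
-- 			res=res+(r*(10**cnt))
-- 		cnt+=1
-- 		n=n//10
--
-- 	while cnt<=k:
-- 		if cnt==k:
-- 			res=res+(d*(10**cnt))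
--
-- 		cnt+=1
-- 	if flag:
-- 		return (-res)
-- 	else:
-- 		return res
-- ===== SOURCE B (Python) =====
-- def fun_set_kth_digit(n, k, d):
--     if k < 0:
--         return n
--     m = -n if n < 0 else n
--     place = 10 ** k
--     res = m + (d - (m // place) % 10) * place
--     return -res if n < 0 else res
-- ===== Notes on version B (the rewrite author's own statement) =====
-- stated objective: simpler
-- what changed: Replaced A's two digit-by-digit reconstruction loops with a single closed-form arithmetic edit of the k-th decimal place (res = m + (d - old)*10^k), keeping the no-op for negative k.
import Mathlib
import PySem

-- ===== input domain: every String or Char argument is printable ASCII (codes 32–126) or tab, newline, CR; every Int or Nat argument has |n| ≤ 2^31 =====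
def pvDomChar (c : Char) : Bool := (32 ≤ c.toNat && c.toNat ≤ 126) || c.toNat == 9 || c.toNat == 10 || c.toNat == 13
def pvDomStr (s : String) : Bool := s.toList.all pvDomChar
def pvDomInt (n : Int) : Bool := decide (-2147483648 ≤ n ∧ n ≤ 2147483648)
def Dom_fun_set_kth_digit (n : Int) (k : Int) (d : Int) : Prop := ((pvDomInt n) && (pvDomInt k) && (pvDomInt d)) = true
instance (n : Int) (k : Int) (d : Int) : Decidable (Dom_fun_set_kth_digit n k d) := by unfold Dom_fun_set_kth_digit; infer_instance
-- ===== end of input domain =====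

-- B replaces A's two digit-by-digit reconstruction loops with one closed-form arithmetic
-- edit of the k-th decimal place (objective: simpler); proved equal on all inputs.

-- ===== PORT A =====
-- first while loop: while n > 0 — rebuilds the digits, substituting d at position k
def pvLoop1 (n : Int) (cnt : Int) (res : Int) (k : Int) (d : Int) : Int × Int :=
  if h : 0 < n then
    let r := PySem.Int.mod n 10
    let res' := if cnt = k then res + d * 10 ^ cnt.toNat else res + r * 10 ^ cnt.toNat
    pvLoop1 (PySem.Int.floordiv n 10) (cnt + 1) res' k d
  else (cnt, res)
termination_by n.toNat
decreasing_by
  rw [PySem.Int.floordiv_eq_ediv_of_pos (by norm_num : (0:Int) < 10)]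
  omega

-- second while loop: while cnt <= k
def pvLoop2 (cnt : Int) (res : Int) (k : Int) (d : Int) : Int :=
  if h : cnt ≤ k then
    let res' := if cnt = k then res + d * 10 ^ cnt.toNat else res
    pvLoop2 (cnt + 1) res' k d
  else res
termination_by (k + 1 - cnt).toNat
decreasing_by omega

def fun_set_kth_digit (n : Int) (k : Int) (d : Int) : Int :=
  let flag : Bool := n < 0
  let n1 := if flag then -n else n
  let p := pvLoop1 n1 0 0 k d
  let res := pvLoop2 p.1 p.2 k d
  if flag then -res else res

-- ===== PORT B =====
def fun_set_kth_digit_alt (n : Int) (k : Int) (d : Int) : Int :=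
  if k < 0 then n
  else
    let m := if n < 0 then -n else n
    let place : Int := 10 ^ k.toNat
    let res := m + (d - PySem.Int.mod (PySem.Int.floordiv m place) 10) * place
    if n < 0 then -res else res

-- ===== PRECONDITION & SPEC =====
def Spec_fun_set_kth_digit (n : Int) (k : Int) (d : Int) (out : Int) : Prop := out = fun_set_kth_digit_alt n k d
instance (n : Int) (k : Int) (d : Int) (out : Int) : Decidable (Spec_fun_set_kth_digit n k d out) := by unfold Spec_fun_set_kth_digit; infer_instance

-- ===== CLAIM (what is proved, stated in full; the proofs are below) =====
def Claim_equal_fun_set_kth_digit : Prop := ∀ (n : Int) (k : Int) (d : Int), Dom_fun_set_kth_digit n k d → Spec_fun_set_kth_digit n k d (fun_set_kth_digit n k d)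

-- ===== LEMMAS AND PROOFS =====

lemma pvLoop2_char (fuel : Nat) : ∀ (cnt res k d : Int), (k + 1 - cnt).toNat ≤ fuel →
    pvLoop2 cnt res k d = if cnt ≤ k then res + d * 10 ^ k.toNat else res := by
  induction fuel with
  | zero =>
    intro cnt res k d h
    rw [pvLoop2]
    have : ¬ cnt ≤ k := by omega
    simp [this]
  | succ fuel ih =>
    intro cnt res k d h
    rw [pvLoop2]
    by_cases hle : cnt ≤ k
    · simp only [hle, dif_pos, if_pos]
      by_cases hk : cnt = k
      · subst hk
        rw [ih (cnt + 1) _ cnt d (by omega)]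
        simp [show ¬ cnt + 1 ≤ cnt by omega]
      · rw [if_neg hk, ih (cnt + 1) res k d (by omega)]
        simp [show cnt + 1 ≤ k by omega]
    · simp [hle]

lemma pvLoop1_char (fuel : Nat) : ∀ (m : Int), m.toNat ≤ fuel → 0 ≤ m →
    ∀ (cnt res k d : Int), 0 ≤ cnt →
    pvLoop2 (pvLoop1 m cnt res k d).1 (pvLoop1 m cnt res k d).2 k d
      = res + m * 10 ^ cnt.toNat
        + (if cnt ≤ k then (d - (m / 10 ^ (k - cnt).toNat) % 10) * 10 ^ k.toNat else 0) := by
  induction fuel with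
  | zero =>
    intro m hf hm cnt res k d hcnt
    have hm0 : m = 0 := by omega
    subst hm0
    rw [pvLoop1]
    simp only [lt_irrefl, dif_neg, not_false_iff]
    rw [pvLoop2_char ((k + 1 - cnt).toNat) cnt res k d le_rfl]
    by_cases hle : cnt ≤ k <;> simp [hle]
  | succ fuel ih =>
    intro m hf hm cnt res k d hcnt
    by_cases hpos : 0 < m
    · rw [pvLoop1]
      simp only [hpos, dif_pos]
      rw [PySem.Int.floordiv_eq_ediv_of_pos (by norm_num : (0:Int) < 10),
          PySem.Int.mod_eq_emod_of_pos (by norm_num : (0:Int) < 10)]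
      have hdiv : (m / 10).toNat ≤ fuel := by omega
      have hdiv0 : 0 ≤ m / 10 := by positivity
      have hsucc : (cnt + 1).toNat = cnt.toNat + 1 := by omega
      have hkey : (10:Int) * (m / 10) + m % 10 = m := Int.mul_ediv_add_emod m 10
      by_cases hk : cnt = k
      · subst hk
        rw [if_pos rfl,
            ih (m / 10) hdiv hdiv0 (cnt + 1) _ cnt d (by omega)]
        simp only [show ¬ cnt + 1 ≤ cnt by omega, if_neg, not_false_iff, le_refl, if_pos,
          hsucc, show (cnt - cnt).toNat = 0 by omega, pow_zero, Int.ediv_one]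
        rw [pow_succ]
        linear_combination (10:Int) ^ cnt.toNat * hkey
      · rw [if_neg hk,
            ih (m / 10) hdiv hdiv0 (cnt + 1) _ k d (by omega)]
        by_cases hle : cnt ≤ k
        · have hlt : cnt < k := lt_of_le_of_ne hle hk
          rw [if_pos (by omega : cnt + 1 ≤ k), if_pos hle]
          have hexp : (k - cnt).toNat = (k - (cnt + 1)).toNat + 1 := by omega
          have hdd : m / 10 / 10 ^ (k - (cnt + 1)).toNat = m / 10 ^ (k - cnt).toNat := by
            rw [hexp, pow_succ']
            rw [Int.ediv_ediv_of_nonneg (by norm_num : (0:Int) ≤ 10)]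
          rw [hdd, hsucc, pow_succ]
          linear_combination (10:Int) ^ cnt.toNat * hkey
        · rw [if_neg (by omega : ¬ cnt + 1 ≤ k), if_neg hle, hsucc, pow_succ]
          linear_combination (10:Int) ^ cnt.toNat * hkey
    · have hm0 : m = 0 := by omega
      subst hm0
      rw [pvLoop1]
      simp only [lt_irrefl, dif_neg, not_false_iff]
      rw [pvLoop2_char ((k + 1 - cnt).toNat) cnt res k d le_rfl]
      by_cases hle : cnt ≤ k <;> simp [hle]

-- ===== VERDICT (by name: the statement is the Claim_ definition above) =====
theorem fun_set_kth_digit_spec : Claim_equal_fun_set_kth_digit := by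
  intro n k d _
  unfold Spec_fun_set_kth_digit fun_set_kth_digit fun_set_kth_digit_alt
  by_cases hneg : n < 0 <;> by_cases hk : k < 0 <;>
    simp only [hneg, hk, decide_true, decide_false, Bool.false_eq_true, reduceIte]
  · -- n < 0, k < 0
    have hmain := pvLoop1_char (-n).toNat (-n) le_rfl (by omega) 0 0 k d le_rfl
    rw [hmain]
    simp [show ¬ (0:Int) ≤ k by omega]
  · -- n < 0, k ≥ 0
    have hmain := pvLoop1_char (-n).toNat (-n) le_rfl (by omega) 0 0 k d le_rfl
    rw [hmain]
    rw [PySem.Int.floordiv_eq_ediv_of_pos (by positivity : (0:Int) < 10 ^ k.toNat),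
        PySem.Int.mod_eq_emod_of_pos (by norm_num : (0:Int) < 10)]
    simp [show (0:Int) ≤ k by omega]
  · -- n ≥ 0, k < 0
    have hmain := pvLoop1_char n.toNat n le_rfl (by omega) 0 0 k d le_rfl
    rw [hmain]
    simp [show ¬ (0:Int) ≤ k by omega]
  · -- n ≥ 0, k ≥ 0
    have hmain := pvLoop1_char n.toNat n le_rfl (by omega) 0 0 k d le_rfl
    rw [hmain]
    rw [PySem.Int.floordiv_eq_ediv_of_pos (by positivity : (0:Int) < 10 ^ k.toNat),
        PySem.Int.mod_eq_emod_of_pos (by norm_num : (0:Int) < 10)]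
    simp [show (0:Int) ≤ k by omega]
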